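-- pv_equiv track=rewrite | github.com/Donny-GUI/tkinter-to-customtkinter-converter | util.py | classes_begin_index
-- ===== SOURCE A (Python) =====
-- def classes_begin_index(lines: list[str]) -> int:
--
--     # first try to put the CTkListBox as the first Class in the class area
--     count = 0
--     for line in lines:
--         if line.startswith("class "):
--             return count
--         count += 1
--
--     # if there is no classes defined in the script. Find the first non import line
--     count = 0
--     for line in lines:
--         if line.startswith("import ") or line.startswith("from "):
--             count += 1
--             continue
--         else:
--             return count
--
--     return count
-- ===== SOURCE B (Python) =====
-- def classes_begin_index(lines: list[str]) -> int:
--     fallback = None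
--     for i, line in enumerate(lines):
--         if line.startswith("class "):
--             return i
--         if fallback is None and not (line.startswith("import ") or line.startswith("from ")):
--             fallback = i
--     return fallback if fallback is not None else len(lines)
-- ===== Notes on version B (the rewrite author's own statement) =====
-- stated objective: simpler
-- what changed: A's two sequential scans (class search, then non-import search) are fused into a single enumerate pass that records the first non-import line as a fallback while continuing to look for a class line.
import Mathlib
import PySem

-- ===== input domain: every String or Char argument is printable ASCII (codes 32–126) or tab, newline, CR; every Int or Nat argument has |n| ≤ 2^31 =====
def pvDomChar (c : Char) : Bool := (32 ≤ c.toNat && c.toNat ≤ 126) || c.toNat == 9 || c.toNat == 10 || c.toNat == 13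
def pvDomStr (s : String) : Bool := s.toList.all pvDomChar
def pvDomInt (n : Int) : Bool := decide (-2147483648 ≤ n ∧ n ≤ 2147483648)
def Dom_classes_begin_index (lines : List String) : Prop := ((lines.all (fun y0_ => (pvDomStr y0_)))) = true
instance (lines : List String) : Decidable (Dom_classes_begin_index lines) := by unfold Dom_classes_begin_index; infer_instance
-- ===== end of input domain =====

-- B fuses A's two sequential scans into one pass recording a fallback; objective: simpler.

-- ===== PORT A =====
-- first loop: return count at the first "class " line, else none
def pvALoop1 (ls : List String) (count : Int) : Option Int :=
  match ls with
  | [] => none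
  | l :: t => if PySem.Str.startswith l "class " then some count else pvALoop1 t (count + 1)

-- second loop: skip import/from lines, return count at the first other line (or the final count)
def pvALoop2 (ls : List String) (count : Int) : Int :=
  match ls with
  | [] => count
  | l :: t =>
    if PySem.Str.startswith l "import " || PySem.Str.startswith l "from " then
      pvALoop2 t (count + 1)
    else count

def classes_begin_index (lines : List String) : Int :=
  match pvALoop1 lines 0 with
  | some c => c
  | none => pvALoop2 lines 0

-- ===== PORT B =====
-- single pass: return i at a "class " line; record the first non-import index as fallback
def pvBLoop (ls : List String) (i : Int) (fallback : Option Int) : Int :=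
  match ls with
  | [] => fallback.getD i
  | l :: t =>
    if PySem.Str.startswith l "class " then i
    else
      pvBLoop t (i + 1)
        (if fallback.isNone &&
            !(PySem.Str.startswith l "import " || PySem.Str.startswith l "from ") then
           some i
         else fallback)

def classes_begin_index_alt (lines : List String) : Int :=
  pvBLoop lines 0 none

-- ===== PRECONDITION & SPEC =====
def Spec_classes_begin_index (lines : List String) (out : Int) : Prop := out = classes_begin_index_alt lines
instance (lines : List String) (out : Int) : Decidable (Spec_classes_begin_index lines out) := by unfold Spec_classes_begin_index; infer_instance

-- ===== CLAIM (what is proved, stated in full; the proofs are below) =====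
def Claim_equal_classes_begin_index : Prop := ∀ (lines : List String), Dom_classes_begin_index lines → Spec_classes_begin_index lines (classes_begin_index lines)

-- ===== LEMMAS AND PROOFS =====

-- once a fallback is recorded, B only still looks for a class line
theorem pvBLoop_some (ls : List String) (i j : Int) :
    pvBLoop ls i (some j) = (pvALoop1 ls i).getD j := by
  induction ls generalizing i with
  | nil => rfl
  | cons l t ih =>
    simp only [pvBLoop, pvALoop1]
    by_cases h : PySem.Str.startswith l "class " = true
    · rw [if_pos h, if_pos h]; rfl
    · rw [if_neg h, if_neg h]
      simpa using ih (i + 1)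

theorem pvBLoop_none (ls : List String) (i : Int) :
    pvBLoop ls i none =
      (match pvALoop1 ls i with
       | some c => c
       | none => pvALoop2 ls i) := by
  induction ls generalizing i with
  | nil => rfl
  | cons l t ih =>
    simp only [pvBLoop, pvALoop1, pvALoop2]
    by_cases hc : PySem.Str.startswith l "class " = true
    · rw [if_pos hc, if_pos hc]
    · rw [if_neg hc, if_neg hc]
      by_cases hi : (PySem.Str.startswith l "import " || PySem.Str.startswith l "from ") = true
      · rw [if_pos hi,
          show (if (Option.isNone (none : Option Int) &&
              !(PySem.Str.startswith l "import " || PySem.Str.startswith l "from ")) = true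
              then some i else (none : Option Int)) = none by
            simp only [Option.isNone_none, Bool.true_and]
            rw [if_neg]
            simp only [hi, Bool.not_true, Bool.false_eq_true, not_false_eq_true]]
        exact ih (i + 1)
      · rw [if_neg hi,
          show (if (Option.isNone (none : Option Int) &&
              !(PySem.Str.startswith l "import " || PySem.Str.startswith l "from ")) = true
              then some i else (none : Option Int)) = some i by
            simp only [Option.isNone_none, Bool.true_and]
            rw [if_pos]
            simp only [Bool.not_eq_true', Bool.not_eq_true] at *
            exact hi,
          pvBLoop_some]
        cases h : pvALoop1 t (i + 1) <;> simp

-- ===== VERDICT (by name: the statement is the Claim_ definition above) =====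
theorem classes_begin_index_spec : Claim_equal_classes_begin_index := by
  intro lines _
  unfold Spec_classes_begin_index classes_begin_index classes_begin_index_alt
  rw [pvBLoop_none]
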